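-- pv_equiv track=rewrite | github.com/abdelfattah-lab/SplitReason | official_results/offload_comparison.py | get_bigmodel_mask
-- ===== SOURCE A (Python) =====
-- def get_bigmodel_mask(
--     text: str,
--     open_tag: str = "<bigmodel>",
--     close_tag: str = "</bigmodel>",
-- ) -> list[int]:
--     """Return a 0/1 mask (one entry per character) for the <bigmodel> regions."""
--     mask = [0] * len(text)
--     start_index = 0
--     while True:
--         open_pos = text.find(open_tag, start_index)
--         if open_pos == -1:
--             break
--         close_pos = text.find(close_tag, open_pos + len(open_tag))
--         if close_pos == -1:  # no close‑tag: mark to the end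
--             mask[open_pos:] = [1] * (len(text) - open_pos)
--             break
--         region_end = close_pos + len(close_tag)
--         mask[open_pos:region_end] = [1] * (region_end - open_pos)
--         start_index = region_end
--     return mask
-- ===== SOURCE B (Python) =====
-- def get_bigmodel_mask(
--     text: str,
--     open_tag: str = "<bigmodel>",
--     close_tag: str = "</bigmodel>",
-- ) -> list[int]:
--     """0/1 mask per character: single left-to-right character scan with an
--     explicit state machine (no str.find, no slice assignment); the output is
--     built run by run."""
--     n = len(text)
--     out = []
--     i = 0
--     while i < n:
--         if text.startswith(open_tag, i):
--             j = i + len(open_tag)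
--             while j <= n and not text.startswith(close_tag, j):
--                 j += 1
--             end = j + len(close_tag) if j <= n else n
--             out.extend([1] * (end - i))
--             i = end
--         else:
--             out.append(0)
--             i += 1
--     return out
-- ===== Notes on version B (the rewrite author's own statement) =====
-- stated objective: alternative
-- what changed: A repeatedly calls str.find and patches a preallocated mask with slice assignments; B makes one character-level scan with an explicit in/out state machine (startswith at each position) and emits the mask run by run, never using find or slice assignment.
import Mathlib
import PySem

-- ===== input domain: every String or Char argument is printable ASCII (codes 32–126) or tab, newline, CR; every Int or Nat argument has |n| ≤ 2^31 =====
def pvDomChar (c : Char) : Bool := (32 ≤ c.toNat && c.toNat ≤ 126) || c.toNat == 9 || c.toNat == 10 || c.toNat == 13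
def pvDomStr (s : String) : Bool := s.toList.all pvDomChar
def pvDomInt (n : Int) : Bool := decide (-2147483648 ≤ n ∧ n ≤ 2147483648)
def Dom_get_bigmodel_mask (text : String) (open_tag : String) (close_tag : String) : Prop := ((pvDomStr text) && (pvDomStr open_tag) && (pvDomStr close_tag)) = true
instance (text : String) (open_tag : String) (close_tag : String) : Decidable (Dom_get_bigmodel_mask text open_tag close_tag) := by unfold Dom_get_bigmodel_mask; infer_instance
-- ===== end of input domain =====

-- B replaces A's find/slice-assignment loop by a single character-level scan with an
-- explicit state machine that emits the mask run by run (objective: alternative).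


-- ===== PORT A =====
-- Python slice assignment mask[a:b] = [1]*(b-a) (here always 0 ≤ a ≤ b ≤ len(mask))
-- is ported as take / replicate / drop.
def pvMaskSet (mask : List Int) (a b : Nat) : List Int :=
  mask.take a ++ List.replicate (b - a) 1 ++ mask.drop b

-- A's 'while True' loop; fuel (len(text)+1) only makes the recursion total: whenever a
-- region is found the loop advances, so inside Pre_ the fuel is never exhausted.
def pvGoA (text opn cls : List Char) (fuel : Nat) (mask : List Int) (start_index : Int) :
    List Int :=
  match fuel with
  | 0 => mask
  | fuel + 1 =>
    let open_pos := PySem.Chars.findFrom text opn start_index none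
    if open_pos = -1 then mask
    else
      let close_pos := PySem.Chars.findFrom text cls (open_pos + (opn.length : Int)) none
      if close_pos = -1 then
        -- mask[open_pos:] = [1] * (len(text) - open_pos)   (open_pos ≥ 0 here)
        mask.take open_pos.toNat ++ List.replicate (text.length - open_pos.toNat) 1
      else
        let region_end := close_pos + (cls.length : Int)    -- ≥ 0 here
        pvGoA text opn cls fuel (pvMaskSet mask open_pos.toNat region_end.toNat) region_end

def get_bigmodel_mask (text : String) (open_tag : String) (close_tag : String) : List Int :=
  pvGoA text.toList open_tag.toList close_tag.toList (text.toList.length + 1)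
    (List.replicate text.toList.length 0) 0

-- ===== PORT B =====
-- inner loop: while j <= n and not text.startswith(close_tag, j): j += 1
-- (Python's text.startswith(tag, j) with 0 ≤ j ≤ len(text) is tag <+: drop j)
def pvScanClose (text cls : List Char) (j : Nat) : Option Nat :=
  if j ≤ text.length then
    if PySem.Chars.startswith (text.drop j) cls then some j
    else pvScanClose text cls (j + 1)
  else none
termination_by text.length + 1 - j

-- outer loop of B; fuel (len(text)+1) only makes the recursion total (see pvGoA)
def pvGoB (text opn cls : List Char) (fuel : Nat) (i : Nat) : List Int :=
  match fuel with
  | 0 => []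
  | fuel + 1 =>
    if i < text.length then
      if PySem.Chars.startswith (text.drop i) opn then
        match pvScanClose text cls (i + opn.length) with
        | none => List.replicate (text.length - i) 1          -- no close tag: ones to the end
        | some j =>
            List.replicate (j + cls.length - i) 1 ++
              pvGoB text opn cls fuel (j + cls.length)
      else 0 :: pvGoB text opn cls fuel (i + 1)
    else []

def get_bigmodel_mask_alt (text : String) (open_tag : String) (close_tag : String) : List Int :=
  pvGoB text.toList open_tag.toList close_tag.toList (text.toList.length + 1) 0

-- ===== PRECONDITION & SPEC =====
-- Pre_ excludes only open_tag = close_tag = "" : there A's loop never advances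
-- start_index past the empty region and DIVERGES (no value is returned).
def Pre_get_bigmodel_mask (text : String) (open_tag : String) (close_tag : String) : Prop :=
  ¬ (open_tag = "" ∧ close_tag = "")
instance (text : String) (open_tag : String) (close_tag : String) :
    Decidable (Pre_get_bigmodel_mask text open_tag close_tag) := by
  unfold Pre_get_bigmodel_mask; infer_instance

def pvWitness_get_bigmodel_mask : String × String × String :=
  ("ab<t>cd</t>e<t>f", "<t>", "</t>")

def Spec_get_bigmodel_mask (text : String) (open_tag : String) (close_tag : String) (out : List Int) : Prop := out = get_bigmodel_mask_alt text open_tag close_tag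
instance (text : String) (open_tag : String) (close_tag : String) (out : List Int) : Decidable (Spec_get_bigmodel_mask text open_tag close_tag out) := by unfold Spec_get_bigmodel_mask; infer_instance

-- ===== CLAIM (what is proved, stated in full; the proofs are below) =====
def Claim_equal_get_bigmodel_mask : Prop := ∀ (text : String) (open_tag : String) (close_tag : String), Dom_get_bigmodel_mask text open_tag close_tag → Pre_get_bigmodel_mask text open_tag close_tag → Spec_get_bigmodel_mask text open_tag close_tag (get_bigmodel_mask text open_tag close_tag)

-- ===== LEMMAS AND PROOFS =====

-- a prefix of a later drop is an infix of an earlier drop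
theorem pv_prefix_drop_infix (l m : List Char) (i q : Nat) (hiq : i ≤ q)
    (h : l <+: m.drop q) : l <:+: m.drop i := by
  obtain ⟨t, ht⟩ := h
  refine ⟨(m.drop i).take (q - i), t, ?_⟩
  have : m.drop q = (m.drop i).drop (q - i) := by
    rw [List.drop_drop]; congr 1; omega
  rw [this] at ht
  rw [List.append_assoc, ht, List.take_append_drop]

-- pvScanClose finds nothing iff cls occurs nowhere in drop j
theorem pvScanClose_eq_none (text cls : List Char) (j : Nat) (hj : j ≤ text.length)
    (h : ¬ cls <:+: text.drop j) : pvScanClose text cls j = none := by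
  rw [pvScanClose, if_pos hj]
  by_cases hs : PySem.Chars.startswith (text.drop j) cls = true
  · exact absurd ((PySem.Chars.startswith_iff _ _).mp hs).isInfix h
  · rw [if_neg hs]
    by_cases hj1 : j + 1 ≤ text.length
    · refine pvScanClose_eq_none text cls (j + 1) hj1 (fun hinf => h ?_)
      have hsuf : text.drop (j + 1) <:+ text.drop j := by
        have : text.drop (j + 1) = (text.drop j).drop 1 := by
          rw [List.drop_drop]
        rw [this]; exact List.drop_suffix 1 _
      exact hinf.trans hsuf.isInfix
    · rw [pvScanClose, if_neg hj1]
termination_by text.length + 1 - j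

-- pvScanClose returns the first match position
theorem pvScanClose_eq_some (text cls : List Char) (j c : Nat) (hj : j ≤ text.length)
    (hcn : c ≤ text.length) (hjc : j ≤ c) (hc : cls <+: text.drop c)
    (hmin : ∀ q, j ≤ q → q < c → ¬ cls <+: text.drop q) :
    pvScanClose text cls j = some c := by
  rw [pvScanClose, if_pos hj]
  by_cases hs : PySem.Chars.startswith (text.drop j) cls = true
  · rw [if_pos hs]
    have : j = c := by
      by_contra hne
      exact hmin j le_rfl (by omega) ((PySem.Chars.startswith_iff _ _).mp hs)
    rw [this]
  · rw [if_neg hs]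
    have hjc' : j < c := by
      rcases Nat.lt_or_ge j c with h' | h'
      · exact h'
      · exact absurd ((PySem.Chars.startswith_iff _ _).mpr (by
          have : j = c := by omega
          rw [this]; exact hc)) hs
    exact pvScanClose_eq_some text cls (j + 1) c (by omega) hcn (by omega) hc
      (fun q hq1 hq2 => hmin q (by omega) hq2)
termination_by c - j

-- B emits only zeros when opn occurs nowhere from i on
theorem pvGoB_zeros (text opn cls : List Char) (i fuel : Nat)
    (hfuel : text.length - i ≤ fuel)
    (h : ∀ q, i ≤ q → ¬ opn <+: text.drop q) :
    pvGoB text opn cls fuel i = List.replicate (text.length - i) 0 := by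
  by_cases hi : i < text.length
  · cases fuel with
    | zero => omega
    | succ f =>
      rw [pvGoB, if_pos hi,
        if_neg (fun hs => h i le_rfl ((PySem.Chars.startswith_iff _ _).mp hs))]
      rw [pvGoB_zeros text opn cls (i + 1) f (by omega) (fun q hq => h q (by omega))]
      have : text.length - i = (text.length - (i + 1)) + 1 := by omega
      rw [this, List.replicate_succ]
  · have : text.length - i = 0 := by omega
    rw [this]
    cases fuel <;> simp [pvGoB, hi]
termination_by text.length - i

-- B skips d non-matching positions, emitting d zeros
theorem pvGoB_skip (text opn cls : List Char) (d : Nat) :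
    ∀ i fuel, i + d ≤ text.length →
    (∀ q, i ≤ q → q < i + d → ¬ opn <+: text.drop q) →
    pvGoB text opn cls (fuel + d) i
      = List.replicate d 0 ++ pvGoB text opn cls fuel (i + d) := by
  induction d with
  | zero => intro i fuel _ _; simp
  | succ d ih =>
    intro i fuel hd h
    have hi : i < text.length := by omega
    have : fuel + (d + 1) = (fuel + d) + 1 := by omega
    rw [this, pvGoB, if_pos hi,
      if_neg (fun hs => h i le_rfl (by omega) ((PySem.Chars.startswith_iff _ _).mp hs))]
    rw [ih (i + 1) fuel (by omega) (fun q hq1 hq2 => h q (by omega) (by omega))]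
    have : i + 1 + d = i + (d + 1) := by omega
    rw [this, List.replicate_succ, List.cons_append]

-- mask arithmetic: take of the invariant mask
theorem pvMask_take (pre : List Int) (i n p : Nat) (hlen : pre.length = i) (hip : i ≤ p) :
    (pre ++ List.replicate (n - i) (0:Int)).take p = pre ++ List.replicate (min (p - i) (n - i)) 0 := by
  rw [List.take_append, List.take_of_length_le (by omega), List.take_replicate, hlen]

-- mask arithmetic: slice assignment on the invariant mask
theorem pvMask_set (pre : List Int) (i n p e : Nat) (hlen : pre.length = i) (hip : i ≤ p)
    (hpe : p ≤ e) (hen : e ≤ n) :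
    pvMaskSet (pre ++ List.replicate (n - i) (0:Int)) p e
      = (pre ++ List.replicate (p - i) 0 ++ List.replicate (e - p) 1) ++ List.replicate (n - e) 0 := by
  unfold pvMaskSet
  rw [pvMask_take pre i n p hlen hip, List.drop_append, List.drop_eq_nil_of_le (by omega),
    List.drop_replicate, hlen, show min (p - i) (n - i) = p - i by omega,
    show n - i - (e - i) = n - e by omega]
  simp [List.append_assoc]

-- main invariant: with the region-free suffix of the mask still all zeros,
-- A's loop from start i produces the prefix followed by B's scan from i
theorem pv_main (text opn cls : List Char) (hpre : opn ≠ [] ∨ cls ≠ [])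
    (i fA fB : Nat) (pre : List Int) (hi : i ≤ text.length) (hlen : pre.length = i)
    (hfA : text.length - i < fA) (hfB : text.length - i < fB) :
    pvGoA text opn cls fA (pre ++ List.replicate (text.length - i) 0) (i : Int)
      = pre ++ pvGoB text opn cls fB i := by
  have hlenpos : 0 < opn.length ∨ 0 < cls.length := by
    rcases hpre with h | h
    · exact Or.inl (List.length_pos_of_ne_nil h)
    · exact Or.inr (List.length_pos_of_ne_nil h)
  cases fA with
  | zero => omega
  | succ a =>
  simp only [pvGoA]
  by_cases hP : PySem.Chars.findFrom text opn (i : Int) none = -1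
  · rw [if_pos hP,
      pvGoB_zeros text opn cls i fB (by omega) (fun q hq hpref =>
        ((PySem.Chars.findFrom_natCast_eq_neg_one_iff text opn i hi).mp hP)
          (pv_prefix_drop_infix opn text i q hq hpref))]
  · rw [if_neg hP]
    obtain ⟨hPi, hPpref, hPmin⟩ := PySem.Chars.findFrom_natCast_spec text opn i hi hP
    have hP0 : 0 ≤ PySem.Chars.findFrom text opn (i : Int) none :=
      le_trans (Int.natCast_nonneg i) hPi
    set P := PySem.Chars.findFrom text opn (i : Int) none with hPdef
    obtain ⟨p, hPp⟩ : ∃ p : Nat, P = (p : Int) :=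
      ⟨P.toNat, (Int.toNat_of_nonneg hP0).symm⟩
    rw [hPp, Int.toNat_natCast] at hPpref hPmin
    rw [hPp, Int.toNat_natCast]
    have hip : i ≤ p := by
      have := hPi; rw [hPp] at this; exact_mod_cast this
    have hpn : p ≤ text.length := by
      have hform := PySem.Chars.findFrom_natCast text opn i hi
      rw [← hPdef] at hform
      by_cases hfind : PySem.Chars.find (text.drop i) opn = -1
      · rw [if_pos hfind] at hform; exact absurd hform hP
      · rw [if_neg hfind] at hform
        have h1 := PySem.Chars.find_le_length (text.drop i) opn
        rw [List.length_drop] at h1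
        have : P ≤ (text.length : Int) := by
          rw [hform]
          have : ((text.length - i : Nat) : Int) = (text.length : Int) - (i : Int) := by
            push_cast [Nat.cast_sub hi]; ring
          omega
        rw [hPp] at this; exact_mod_cast this
    have hopnlen : opn.length ≤ text.length - p := by
      have := hPpref.length_le; rw [List.length_drop] at this; exact this
    have hj0 : p + opn.length ≤ text.length := by omega
    have hstart : ((p : Int) + (opn.length : Int)) = ((p + opn.length : Nat) : Int) := by
      push_cast; ring
    rw [hstart]
    by_cases hQ : PySem.Chars.findFrom text cls ((p + opn.length : Nat) : Int) none = -1
    · -- no close tag: A marks to the end, B does the same after skipping to p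
      rw [if_pos hQ]
      have hskip : pvGoB text opn cls fB i
          = List.replicate (p - i) 0 ++ pvGoB text opn cls (fB - (p - i)) p := by
        have h := pvGoB_skip text opn cls (p - i) i (fB - (p - i)) (by omega)
          (fun q h1 h2 => hPmin q h1 (by omega))
        rw [show fB - (p - i) + (p - i) = fB by omega, show i + (p - i) = p by omega] at h
        exact h
      rw [hskip,
        pvMask_take pre i text.length p hlen hip,
        show min (p - i) (text.length - i) = p - i by omega]
      by_cases hpn' : p < text.length
      · obtain ⟨b', hb'⟩ : ∃ b', fB - (p - i) = b' + 1 := ⟨fB - (p - i) - 1, by omega⟩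
        rw [hb']
        simp only [pvGoB]
        rw [if_pos hpn', if_pos ((PySem.Chars.startswith_iff _ _).mpr hPpref),
          pvScanClose_eq_none text cls (p + opn.length) hj0
            ((PySem.Chars.findFrom_natCast_eq_neg_one_iff text cls (p + opn.length) hj0).mp hQ)]
        rw [List.append_assoc]
      · have hpeq : p = text.length := by omega
        have hB0 : pvGoB text opn cls (fB - (p - i)) p = [] := by
          cases h : fB - (p - i) with
          | zero => simp [pvGoB]
          | succ b => simp [pvGoB, hpeq]
        rw [hB0, hpeq]
        simp
    · -- close tag found: one region, then recurse
      rw [if_neg hQ]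
      obtain ⟨hQj, hQpref, hQmin⟩ :=
        PySem.Chars.findFrom_natCast_spec text cls (p + opn.length) hj0 hQ
      have hQ0 : 0 ≤ PySem.Chars.findFrom text cls ((p + opn.length : Nat) : Int) none :=
        le_trans (Int.natCast_nonneg _) hQj
      set Q := PySem.Chars.findFrom text cls ((p + opn.length : Nat) : Int) none with hQdef
      obtain ⟨c, hQc⟩ : ∃ c : Nat, Q = (c : Int) :=
        ⟨Q.toNat, (Int.toNat_of_nonneg hQ0).symm⟩
      rw [hQc, Int.toNat_natCast] at hQpref hQmin
      have hj0c : p + opn.length ≤ c := by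
        have := hQj; rw [hQc] at this; exact_mod_cast this
      have hcn : c ≤ text.length := by
        have hform := PySem.Chars.findFrom_natCast text cls (p + opn.length) hj0
        rw [← hQdef] at hform
        by_cases hfind : PySem.Chars.find (text.drop (p + opn.length)) cls = -1
        · rw [if_pos hfind] at hform; exact absurd hform hQ
        · rw [if_neg hfind] at hform
          have h1 := PySem.Chars.find_le_length (text.drop (p + opn.length)) cls
          rw [List.length_drop] at h1
          have : Q ≤ (text.length : Int) := by
            rw [hform]
            have : ((text.length - (p + opn.length) : Nat) : Int)
                = (text.length : Int) - ((p + opn.length : Nat) : Int) := by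
              push_cast [Nat.cast_sub hj0]; ring
            omega
          rw [hQc] at this; exact_mod_cast this
      have hclslen : cls.length ≤ text.length - c := by
        have := hQpref.length_le; rw [List.length_drop] at this; exact this
      have hen : c + cls.length ≤ text.length := by omega
      have hpe : p < c + cls.length := by omega
      have hie : i < c + cls.length := by omega
      have hregion : Q + (cls.length : Int) = ((c + cls.length : Nat) : Int) := by
        rw [hQc]; push_cast; ring
      rw [hregion, Int.toNat_natCast]
      rw [pvMask_set pre i text.length p (c + cls.length) hlen hip (by omega) hen]
      rw [pv_main text opn cls hpre (c + cls.length) a (fB - (p - i) - 1)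
        (pre ++ List.replicate (p - i) 0 ++ List.replicate (c + cls.length - p) 1)
        hen (by simp; omega) (by omega) (by omega)]
      have hskip : pvGoB text opn cls fB i
          = List.replicate (p - i) 0 ++ pvGoB text opn cls (fB - (p - i)) p := by
        have h := pvGoB_skip text opn cls (p - i) i (fB - (p - i)) (by omega)
          (fun q h1 h2 => hPmin q h1 (by omega))
        rw [show fB - (p - i) + (p - i) = fB by omega, show i + (p - i) = p by omega] at h
        exact h
      rw [hskip]
      obtain ⟨b', hb'⟩ : ∃ b', fB - (p - i) = b' + 1 := ⟨fB - (p - i) - 1, by omega⟩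
      rw [hb']
      simp only [pvGoB]
      rw [if_pos (show p < text.length by omega),
        if_pos ((PySem.Chars.startswith_iff _ _).mpr hPpref),
        pvScanClose_eq_some text cls (p + opn.length) c hj0 hcn hj0c hQpref hQmin]
      rw [show b' = fB - (p - i) - 1 by omega]
      simp [List.append_assoc]
termination_by text.length - i
decreasing_by omega

-- ===== VERDICT (by name: the statement is the Claim_ definition above) =====
theorem get_bigmodel_mask_spec : Claim_equal_get_bigmodel_mask := by
  intro text open_tag close_tag _ hpre
  unfold Spec_get_bigmodel_mask get_bigmodel_mask get_bigmodel_mask_alt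
  have hpre' : open_tag.toList ≠ [] ∨ close_tag.toList ≠ [] := by
    by_contra h
    rw [not_or, not_not, not_not] at h
    exact hpre ⟨String.toList_inj.mp (by simpa using h.1),
                String.toList_inj.mp (by simpa using h.2)⟩
  have := pv_main text.toList open_tag.toList close_tag.toList hpre' 0
    (text.toList.length + 1) (text.toList.length + 1) [] (by omega) rfl (by omega) (by omega)
  simpa using this
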